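-- pv_equiv track=rewrite | github.com/VittorioPorri/universita | ASD/problem_set/1/es2.py | cerca_delta_primo
-- ===== SOURCE A (Python) =====
-- def coppia(A: list, delta: int) -> list:
--     l = []
--     l.append([A[0], A[0] + delta])
--
--     for i in range(1, len(A)):
--         if l[i - 1][1] > A[i]:
--             #se arriva un cliente mentre lavoro aspetta
--             l.append([l[i - 1][1], l[i - 1][1] + delta])
--         else:
--             l.append([A[i], A[i] + delta])
--
--     return l
--
-- def cerca_delta_primo(A: list, delta1: int, delta2: int, M: int) -> int:
--     if delta1 > delta2:
--         return delta2
--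
--     d = (delta1 + delta2) // 2
--
--     C = coppia(A, d)
--     if C[len(A)-1][1] <= M:
--         #se ho ancora tempo posso cercare tra d+1 e delta2
--         return cerca_delta_primo(A, d + 1, delta2, M)
--     else:
--         #se ho sforato M cerco tra delta1 e d-1
--         return cerca_delta_primo(A, delta1, d - 1, M)
-- ===== SOURCE B (Python) =====
-- def cerca_delta_primo(A, delta1, delta2, M):
--     if delta1 > delta2:
--         return delta2
--     n = len(A)
--     # largest d with completion time <= M: min over j of floor((M - A[j]) / (n - j))
--     dmax = min((M - A[j]) // (n - j) for j in range(n))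
--     if dmax >= delta2:
--         return delta2
--     if dmax < delta1:
--         return delta1 - 1
--     return dmax
-- ===== Notes on version B (the rewrite author's own statement) =====
-- stated objective: faster
-- what changed: Replaces the recursive binary search (which rebuilds the whole schedule via coppia at every probe) by a closed form: the largest feasible delta is min over j of floor((M-A[j])/(n-j)), clamped to [delta1, delta2] with the same out-of-range answers as the search.
import Mathlib
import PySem

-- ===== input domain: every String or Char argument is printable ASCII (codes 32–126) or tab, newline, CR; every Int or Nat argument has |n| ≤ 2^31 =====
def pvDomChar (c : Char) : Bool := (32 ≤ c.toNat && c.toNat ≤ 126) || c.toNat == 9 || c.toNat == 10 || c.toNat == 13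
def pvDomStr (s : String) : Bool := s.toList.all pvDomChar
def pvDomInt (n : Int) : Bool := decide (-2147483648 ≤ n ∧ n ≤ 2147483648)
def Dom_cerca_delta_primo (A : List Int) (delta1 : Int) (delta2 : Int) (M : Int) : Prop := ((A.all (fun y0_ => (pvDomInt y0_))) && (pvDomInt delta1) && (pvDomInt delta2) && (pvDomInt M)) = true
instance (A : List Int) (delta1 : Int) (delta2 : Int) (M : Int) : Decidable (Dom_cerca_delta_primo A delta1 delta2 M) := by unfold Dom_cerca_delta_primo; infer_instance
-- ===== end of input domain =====

-- B replaces A's recursive binary search (rebuilding the whole schedule at each probe) by the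
-- closed form dmax = min_j floor((M-A[j])/(n-j)) clamped to [delta1, delta2]  (objective: faster).

-- ===== PORT A =====
-- the pyGetD defaults are only reached when A = [], where Python raises IndexError (excluded by Pre_)
def coppia (A : List Int) (delta : Int) : List (Int × Int) :=
  let a0 := PySem.List.pyGetD A 0 0
  let l0 : List (Int × Int) := [(a0, a0 + delta)]
  (PySem.List.pyRange 1 (A.length : Int) 1).foldl
    (fun l i =>
      let prev := PySem.List.pyGetD l (i - 1) (0, 0)
      let ai := PySem.List.pyGetD A i 0
      if prev.2 > ai then l ++ [(prev.2, prev.2 + delta)]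
      else l ++ [(ai, ai + delta)])
    l0

def cerca_delta_primo (A : List Int) (delta1 : Int) (delta2 : Int) (M : Int) : Int :=
  if h : delta1 > delta2 then delta2
  else
    let d := PySem.Int.floordiv (delta1 + delta2) 2
    let C := coppia A d
    if (PySem.List.pyGetD C ((A.length : Int) - 1) (0, 0)).2 ≤ M then
      cerca_delta_primo A (d + 1) delta2 M
    else
      cerca_delta_primo A delta1 (d - 1) M
termination_by (delta2 - delta1 + 1).toNat
decreasing_by
  · have := PySem.Int.floordiv_two_mid_bounds (lo := delta1) (hi := delta2) (by omega)
    omega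
  · have := PySem.Int.floordiv_two_mid_bounds (lo := delta1) (hi := delta2) (by omega)
    omega

-- ===== PORT B =====
-- min(...) over a nonempty generator; the getD 0 default is only reached when A = []
-- (where Python's min raises ValueError; excluded by Pre_)
def cerca_delta_primo_alt (A : List Int) (delta1 : Int) (delta2 : Int) (M : Int) : Int :=
  if delta1 > delta2 then delta2
  else
    let n : Int := (A.length : Int)
    let dmax := (PySem.List.min?
        ((PySem.List.pyRange 0 n 1).map
          (fun j => PySem.Int.floordiv (M - PySem.List.pyGetD A j 0) (n - j)))
        (fun x => x)).getD 0
    if dmax ≥ delta2 then delta2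
    else if dmax < delta1 then delta1 - 1
    else dmax

-- ===== PRECONDITION & SPEC =====
-- Pre_ excludes exactly the inputs where Python A raises: A = [] with delta1 ≤ delta2 (IndexError in coppia)
def Pre_cerca_delta_primo (A : List Int) (delta1 : Int) (delta2 : Int) (M : Int) : Prop :=
  A ≠ [] ∨ delta2 < delta1
instance (A : List Int) (delta1 : Int) (delta2 : Int) (M : Int) : Decidable (Pre_cerca_delta_primo A delta1 delta2 M) := by unfold Pre_cerca_delta_primo; infer_instance

def pvWitness_cerca_delta_primo : List Int × Int × Int × Int := ([0], 0, 0, 0)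

def Spec_cerca_delta_primo (A : List Int) (delta1 : Int) (delta2 : Int) (M : Int) (out : Int) : Prop := out = cerca_delta_primo_alt A delta1 delta2 M
instance (A : List Int) (delta1 : Int) (delta2 : Int) (M : Int) (out : Int) : Decidable (Spec_cerca_delta_primo A delta1 delta2 M out) := by unfold Spec_cerca_delta_primo; infer_instance

-- ===== CLAIM (what is proved, stated in full; the proofs are below) =====
def Claim_equal_cerca_delta_primo : Prop := ∀ (A : List Int) (delta1 : Int) (delta2 : Int) (M : Int), Dom_cerca_delta_primo A delta1 delta2 M → Pre_cerca_delta_primo A delta1 delta2 M → Spec_cerca_delta_primo A delta1 delta2 M (cerca_delta_primo A delta1 delta2 M)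

-- ===== LEMMAS AND PROOFS =====

-- running completion time of the schedule: end_i = max(end_{i-1}, A_i) + d
def pvEnds (e : Int) (d : Int) (rest : List Int) : Int :=
  rest.foldl (fun e a => max e a + d) e

lemma pvEnds_le_iff (rest : List Int) (e d M : Int) :
    pvEnds e d rest ≤ M ↔
      (e + (rest.length : Int) * d ≤ M ∧
       ∀ i : Nat, (h : i < rest.length) →
         rest[i] + ((rest.length : Int) - (i : Int)) * d ≤ M) := by
  induction rest generalizing e with
  | nil => simp [pvEnds]
  | cons x t ih =>
    have hstep : pvEnds e d (x :: t) = pvEnds (max e x + d) d t := rfl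
    rw [hstep, ih]
    simp only [List.length_cons, Nat.cast_add, Nat.cast_one]
    constructor
    · rintro ⟨h1, h2⟩
      have hr1 : (((t.length : Int)) + 1) * d = (t.length : Int) * d + d := by ring
      refine ⟨?_, ?_⟩
      · rw [hr1]
        linarith [le_max_left e x]
      · intro i hi
        cases i with
        | zero =>
          simp only [List.getElem_cons_zero, Nat.cast_zero]
          have hr2 : (((t.length : Int)) + 1 - 0) * d = (t.length : Int) * d + d := by ring
          rw [hr2]
          linarith [le_max_right e x]
        | succ j =>
          have hj : j < t.length := by simpa using hi
          have h3 := h2 j hj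
          simp only [List.getElem_cons_succ, Nat.cast_add, Nat.cast_one]
          have hr3 : (((t.length : Int)) + 1 - ((j : Int) + 1)) * d
              = ((t.length : Int) - (j : Int)) * d := by ring
          rw [hr3]
          exact h3
    · rintro ⟨h1, h2⟩
      have h0 := h2 0 (by simp)
      simp only [List.getElem_cons_zero, Nat.cast_zero] at h0
      have hr1 : (((t.length : Int)) + 1) * d = (t.length : Int) * d + d := by ring
      have hr2 : (((t.length : Int)) + 1 - 0) * d = (t.length : Int) * d + d := by ring
      rw [hr1] at h1
      rw [hr2] at h0
      refine ⟨?_, ?_⟩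
      · rcases max_choice e x with hc | hc <;> rw [hc] <;> linarith
      · intro i hi
        have h3 := h2 (i + 1) (by simpa using Nat.succ_lt_succ hi)
        simp only [List.getElem_cons_succ, Nat.cast_add, Nat.cast_one] at h3
        have hr3 : (((t.length : Int)) + 1 - ((i : Int) + 1)) * d
            = ((t.length : Int) - (i : Int)) * d := by ring
        rw [hr3] at h3
        exact h3

-- the step function of coppia's loop, for A = a :: t
def pvStep (a : Int) (t : List Int) (d : Int) (l : List (Int × Int)) (i : Int) : List (Int × Int) :=
  let prev := PySem.List.pyGetD l (i - 1) (0, 0)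
  let ai := PySem.List.pyGetD (a :: t) i 0
  if prev.2 > ai then l ++ [(prev.2, prev.2 + d)]
  else l ++ [(ai, ai + d)]

lemma pvCoppia_eq_fold (a : Int) (t : List Int) (d : Int) :
    coppia (a :: t) d =
      (PySem.List.pyRange 1 (1 + (t.length : Int)) 1).foldl (pvStep a t d) [(a, a + d)] := by
  have hb : (((a :: t).length : Int)) = 1 + (t.length : Int) := by
    simp only [List.length_cons]; push_cast; ring
  simp only [coppia, PySem.List.pyGetD_zero_cons, hb]
  rfl

lemma pvFold_inv (a : Int) (t : List Int) (d : Int) :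
    ∀ k : Nat, k ≤ t.length →
      ((PySem.List.pyRange 1 (1 + (k : Int)) 1).foldl (pvStep a t d) [(a, a + d)]).length = k + 1 ∧
      (((PySem.List.pyRange 1 (1 + (k : Int)) 1).foldl (pvStep a t d) [(a, a + d)]).getD k (0, 0)).2
        = pvEnds (a + d) d (t.take k) := by
  intro k
  induction k with
  | zero =>
    intro _
    rw [PySem.List.pyRange_one_eq_nil (by omega)]
    simp [pvEnds]
  | succ k ih =>
    intro hk
    obtain ⟨hlen, hlast⟩ := ih (Nat.le_of_succ_le hk)
    have hsplit : PySem.List.pyRange 1 (1 + ((k + 1 : Nat) : Int)) 1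
        = PySem.List.pyRange 1 (1 + (k : Int)) 1 ++ [1 + (k : Int)] := by
      have h1 : (1 : Int) ≤ 1 + (k : Int) := by omega
      have h2 : (1 + (k : Int)) ≤ 1 + ((k + 1 : Nat) : Int) := by push_cast; omega
      rw [PySem.List.pyRange_one_append 1 (1 + (k : Int)) _ h1 h2]
      have h3 : (1 : Int) + ((k + 1 : Nat) : Int) = (1 + (k : Int)) + 1 := by push_cast; ring
      rw [h3, PySem.List.pyRange_one_singleton]
    rw [hsplit, List.foldl_append]
    set L := (PySem.List.pyRange 1 (1 + (k : Int)) 1).foldl (pvStep a t d) [(a, a + d)] with hL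
    have hkt : k < t.length := Nat.lt_of_succ_le hk
    have hprev : PySem.List.pyGetD L ((1 + (k : Int)) - 1) (0, 0) = L.getD k (0, 0) := by
      have h4 : (1 + (k : Int)) - 1 = ((k : Nat) : Int) := by ring
      rw [h4, PySem.List.pyGetD_natCast]
    have hai : PySem.List.pyGetD (a :: t) (1 + (k : Int)) 0 = t[k] := by
      have h5 : (1 + (k : Int)) = (((k + 1 : Nat)) : Int) := by push_cast; ring
      rw [h5, PySem.List.pyGetD_natCast]
      simp [List.getD, List.getElem?_cons_succ, List.getElem?_eq_getElem hkt]
    have hstep : pvStep a t d L (1 + (k : Int)) =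
        L ++ [if (L.getD k (0, 0)).2 > t[k]
              then ((L.getD k (0, 0)).2, (L.getD k (0, 0)).2 + d)
              else (t[k], t[k] + d)] := by
      simp only [pvStep, hprev, hai]
      split_ifs <;> rfl
    simp only [List.foldl_cons, List.foldl_nil]
    rw [hstep]
    constructor
    · simp [hlen]
    · have hgetnew : ((L ++ [if (L.getD k (0, 0)).2 > t[k]
              then ((L.getD k (0, 0)).2, (L.getD k (0, 0)).2 + d)
              else (t[k], t[k] + d)]).getD (k + 1) (0, 0))
          = (if (L.getD k (0, 0)).2 > t[k]
              then ((L.getD k (0, 0)).2, (L.getD k (0, 0)).2 + d)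
              else (t[k], t[k] + d)) := by
        have h6 : k + 1 = L.length := by omega
        rw [h6]
        simp [List.getD]
      rw [hgetnew]
      have htake : t.take (k + 1) = t.take k ++ [t[k]] := by
        rw [List.take_add_one]
        simp [List.getElem?_eq_getElem hkt]
      have hEnds : pvEnds (a + d) d (t.take (k + 1))
          = max (pvEnds (a + d) d (t.take k)) t[k] + d := by
        rw [htake]
        simp only [pvEnds, List.foldl_append, List.foldl_cons, List.foldl_nil]
      rw [hEnds, ← hlast]
      by_cases hlt : (L.getD k (0, 0)).2 > t[k]
      · rw [if_pos hlt, max_eq_left (le_of_lt hlt)]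
      · rw [if_neg hlt, max_eq_right (not_lt.mp hlt)]

lemma pvCoppia_last (a : Int) (t : List Int) (d : Int) :
    (PySem.List.pyGetD (coppia (a :: t) d) (((a :: t).length : Int) - 1) (0, 0)).2
      = pvEnds (a + d) d t := by
  obtain ⟨hlen, hlast⟩ := pvFold_inv a t d t.length (le_refl _)
  rw [pvCoppia_eq_fold]
  have hidx : (((a :: t).length : Int)) - 1 = ((t.length : Nat) : Int) := by
    simp only [List.length_cons]; push_cast; ring
  rw [hidx, PySem.List.pyGetD_natCast]
  simpa using hlast

-- the list of per-job bounds and the closed-form candidate computed by B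
def pvL (A : List Int) (M : Int) : List Int :=
  (PySem.List.pyRange 0 (A.length : Int) 1).map
    (fun j => PySem.Int.floordiv (M - PySem.List.pyGetD A j 0) ((A.length : Int) - j))

def pvQ (A : List Int) (M : Int) : Int :=
  (PySem.List.min? (pvL A M) (fun x => x)).getD 0

lemma pvAlt_eq (A : List Int) (delta1 delta2 M : Int) :
    cerca_delta_primo_alt A delta1 delta2 M =
      if delta1 > delta2 then delta2
      else if pvQ A M ≥ delta2 then delta2
      else if pvQ A M < delta1 then delta1 - 1
      else pvQ A M := rfl

-- d is at most B's candidate iff the schedule with gap d finishes by M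
lemma pvQ_le_iff (a : Int) (t : List Int) (M d : Int) :
    d ≤ pvQ (a :: t) M ↔ pvEnds (a + d) d t ≤ M := by
  have hnpos : (0 : Int) < ((a :: t).length : Int) := by simp
  have hLne : pvL (a :: t) M ≠ [] := by
    simp only [pvL, ne_eq, List.map_eq_nil_iff]
    intro hnil
    rw [PySem.List.pyRange_one_cons hnpos] at hnil
    exact List.cons_ne_nil _ _ hnil
  obtain ⟨m, hm⟩ : ∃ m, PySem.List.min? (pvL (a :: t) M) (fun x => x) = some m := by
    rcases h : PySem.List.min? (pvL (a :: t) M) (fun x => x) with _ | m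
    · exact absurd ((PySem.List.min?_eq_none_iff _ _).mp h) hLne
    · exact ⟨m, rfl⟩
  have hq : pvQ (a :: t) M = m := by simp [pvQ, hm]
  have hiff1 : d ≤ pvQ (a :: t) M ↔ ∀ y ∈ pvL (a :: t) M, d ≤ y := by
    rw [hq]
    constructor
    · intro hdm y hy
      exact le_trans hdm (PySem.List.min?_isMin hm y hy)
    · intro hall
      exact hall m (PySem.List.min?_mem hm)
  have hiff2 : (∀ y ∈ pvL (a :: t) M, d ≤ y) ↔
      ∀ jn : Nat, (h : jn < (a :: t).length) →
        (a :: t)[jn] + (((a :: t).length : Int) - (jn : Int)) * d ≤ M := by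
    rw [pvL, List.forall_mem_map]
    constructor
    · intro hall jn hjn
      have hjmem : ((jn : Nat) : Int) ∈ PySem.List.pyRange 0 ((a :: t).length : Int) 1 := by
        rw [PySem.List.mem_pyRange_one]
        exact ⟨by positivity, by exact_mod_cast hjn⟩
      have h7 := hall _ hjmem
      rw [PySem.List.pyGetD_natCast] at h7
      have hpos : (0 : Int) < ((a :: t).length : Int) - (jn : Int) := by
        have : ((jn : Nat) : Int) < ((a :: t).length : Int) := by exact_mod_cast hjn
        omega
      rw [PySem.Int.le_floordiv_iff_mul_le hpos] at h7
      rw [List.getD_eq_getElem _ 0 hjn] at h7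
      rw [mul_comm] at h7
      linarith
    · intro hall j hj
      rw [PySem.List.mem_pyRange_one] at hj
      obtain ⟨hj0, hjn⟩ := hj
      have hjnat : j = ((j.toNat : Nat) : Int) := by omega
      have hjlt : j.toNat < (a :: t).length := by omega
      rw [hjnat, PySem.List.pyGetD_natCast, List.getD_eq_getElem _ 0 hjlt]
      have hpos : (0 : Int) < ((a :: t).length : Int) - ((j.toNat : Nat) : Int) := by omega
      rw [PySem.Int.le_floordiv_iff_mul_le hpos]
      have h8 := hall j.toNat hjlt
      rw [mul_comm] at h8
      linarith
  have hiff3 : (∀ jn : Nat, (h : jn < (a :: t).length) →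
        (a :: t)[jn] + (((a :: t).length : Int) - (jn : Int)) * d ≤ M)
      ↔ pvEnds (a + d) d t ≤ M := by
    rw [pvEnds_le_iff]
    constructor
    · intro hall
      constructor
      · have h9 := hall 0 (by simp)
        simp only [List.getElem_cons_zero, List.length_cons, Nat.cast_add, Nat.cast_one,
          Nat.cast_zero] at h9
        have hr : (((t.length : Int)) + 1 - 0) * d = (t.length : Int) * d + d := by ring
        rw [hr] at h9
        linarith
      · intro i hi
        have h10 := hall (i + 1) (by simp; omega)
        simp only [List.getElem_cons_succ, List.length_cons, Nat.cast_add, Nat.cast_one] at h10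
        have hr : (((t.length : Int)) + 1 - ((i : Int) + 1)) * d
            = ((t.length : Int) - (i : Int)) * d := by ring
        rw [hr] at h10
        exact h10
    · rintro ⟨h1, h2⟩ jn hjn
      cases jn with
      | zero =>
        simp only [List.getElem_cons_zero, List.length_cons, Nat.cast_add, Nat.cast_one,
          Nat.cast_zero]
        have hr : (((t.length : Int)) + 1 - 0) * d = (t.length : Int) * d + d := by ring
        rw [hr]
        linarith
      | succ i =>
        have hit : i < t.length := by simp at hjn; omega
        have h11 := h2 i hit
        simp only [List.getElem_cons_succ, List.length_cons, Nat.cast_add, Nat.cast_one]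
        have hr : (((t.length : Int)) + 1 - ((i : Int) + 1)) * d
            = ((t.length : Int) - (i : Int)) * d := by ring
        rw [hr]
        exact h11
  rw [hiff1, hiff2, hiff3]

lemma pvMain (a : Int) (t : List Int) (M : Int) :
    ∀ N : Nat, ∀ delta1 delta2 : Int, (delta2 - delta1 + 1).toNat ≤ N →
      cerca_delta_primo (a :: t) delta1 delta2 M = cerca_delta_primo_alt (a :: t) delta1 delta2 M := by
  intro N
  induction N with
  | zero =>
    intro δ1 δ2 hN
    have h : δ1 > δ2 := by omega
    rw [cerca_delta_primo, pvAlt_eq]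
    simp [h]
  | succ N ih =>
    intro δ1 δ2 hN
    by_cases h : δ1 > δ2
    · rw [cerca_delta_primo, pvAlt_eq]
      simp [h]
    · have hle : δ1 ≤ δ2 := by omega
      obtain ⟨hd1, hd2⟩ := PySem.Int.floordiv_two_mid_bounds (lo := δ1) (hi := δ2) hle
      set d := PySem.Int.floordiv (δ1 + δ2) 2 with hd
      rw [cerca_delta_primo]
      rw [dif_neg h]
      simp only [← hd, pvCoppia_last]
      by_cases hf : pvEnds (a + d) d t ≤ M
      · rw [if_pos hf]
        rw [ih (d + 1) δ2 (by omega)]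
        have hdq : d ≤ pvQ (a :: t) M := (pvQ_le_iff a t M d).mpr hf
        rw [pvAlt_eq, pvAlt_eq]
        split_ifs <;> omega
      · rw [if_neg hf]
        rw [ih δ1 (d - 1) (by omega)]
        have hdq : ¬ d ≤ pvQ (a :: t) M := fun hc => hf ((pvQ_le_iff a t M d).mp hc)
        rw [pvAlt_eq, pvAlt_eq]
        split_ifs <;> omega

-- ===== VERDICT (by name: the statement is the Claim_ definition above) =====
theorem cerca_delta_primo_spec : Claim_equal_cerca_delta_primo := by
  intro A δ1 δ2 M _ hpre
  unfold Spec_cerca_delta_primo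
  cases A with
  | nil =>
    have h : δ2 < δ1 := by
      rcases hpre with h | h
      · exact absurd rfl h
      · exact h
    rw [cerca_delta_primo, pvAlt_eq]
    simp [show δ1 > δ2 from h]
  | cons a t =>
    exact pvMain a t M (δ2 - δ1 + 1).toNat δ1 δ2 (le_refl _)
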